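-- pv_equiv track=rewrite | github.com/Akashdevgan02/Cyber-Analyst | backend/services/parser.py | _wazuh_event_type
-- ===== SOURCE A (Python) =====
-- from typing import List, Dict, Any, Optional
--
-- WAZUH_RULE_TYPE_MAP = {
--     range(510, 515): "rootcheck_anomaly",
--     range(550, 554): "integrity_check",
--     range(5501, 5504): "login_event",
--     range(5710, 5717): "ssh_auth_failure",
--     range(5402, 5404): "sudo_event",
--     range(5551, 5553): "multiple_auth_failure",
--     range(2501, 2503): "syscheck_change",
--     range(31100, 31200): "web_attack",
-- }
--
-- def _wazuh_event_type(rule_id: Any) -> str: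
--     try:
--         rid = int(rule_id)
--     except (TypeError, ValueError):
--         return "unknown"
--     for id_range, etype in WAZUH_RULE_TYPE_MAP.items():
--         if rid in id_range:
--             return etype
--     return f"wazuh_rule_{rid}"
-- ===== SOURCE B (Python) =====
-- from typing import List, Dict, Any, Optional
--
-- WAZUH_RULE_TYPE_MAP = {
--     range(510, 515): "rootcheck_anomaly",
--     range(550, 554): "integrity_check",
--     range(5501, 5504): "login_event",
--     range(5710, 5717): "ssh_auth_failure",
--     range(5402, 5404): "sudo_event",
--     range(5551, 5553): "multiple_auth_failure",
--     range(2501, 2503): "syscheck_change",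
--     range(31100, 31200): "web_attack",
-- }
--
-- # Sorted interval table built once: (start, stop, event_type) sorted by start.
-- # The ranges are pairwise disjoint, so binary search for the last start <= rid
-- # finds the only interval that can contain rid.
-- _TABLE = sorted(((r.start, r.stop, etype) for r, etype in WAZUH_RULE_TYPE_MAP.items()),
--                 key=lambda t: t[0])
--
-- def _wazuh_event_type(rule_id: Any) -> str:
--     try:
--         rid = int(rule_id)
--     except (TypeError, ValueError):
--         return "unknown"
--     lo, hi = 0, len(_TABLE)
--     while lo < hi:                       # binary search: lo ends as #starts <= rid
--         mid = (lo + hi) // 2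
--         if _TABLE[mid][0] <= rid:
--             lo = mid + 1
--         else:
--             hi = mid
--     if lo > 0:
--         start, stop, etype = _TABLE[lo - 1]
--         if rid < stop:
--             return etype
--     return f"wazuh_rule_{rid}"
-- ===== Notes on version B (the rewrite author's own statement) =====
-- stated objective: alternative
-- what changed: A's linear scan over the range->type map is replaced by a sorted (start, stop, type) interval table built once plus a binary search for the last interval start <= rid (correct because the ranges are pairwise disjoint), followed by one stop-bound check.
import Mathlib
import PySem

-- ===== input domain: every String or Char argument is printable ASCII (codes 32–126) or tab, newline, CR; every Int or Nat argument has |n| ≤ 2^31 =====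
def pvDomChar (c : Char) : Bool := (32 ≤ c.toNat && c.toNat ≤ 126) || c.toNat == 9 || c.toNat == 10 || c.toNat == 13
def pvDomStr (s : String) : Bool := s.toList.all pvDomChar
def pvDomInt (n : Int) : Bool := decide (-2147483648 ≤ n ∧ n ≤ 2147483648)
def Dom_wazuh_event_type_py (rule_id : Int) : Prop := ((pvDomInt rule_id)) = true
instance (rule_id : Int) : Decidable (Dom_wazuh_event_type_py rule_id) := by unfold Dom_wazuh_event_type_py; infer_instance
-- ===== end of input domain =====

-- B replaces A's linear scan over the range map by a sorted interval table plus binary search (different algorithm, same results; ranges are disjoint).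


-- ===== PORT A =====
-- WAZUH_RULE_TYPE_MAP: each dict key range(a, b) is represented by its bounds (a, b).
def wazuhRuleTypeMap : List ((Int × Int) × String) :=
  [ ((510, 515), "rootcheck_anomaly"),
    ((550, 554), "integrity_check"),
    ((5501, 5504), "login_event"),
    ((5710, 5717), "ssh_auth_failure"),
    ((5402, 5404), "sudo_event"),
    ((5551, 5553), "multiple_auth_failure"),
    ((2501, 2503), "syscheck_change"),
    ((31100, 31200), "web_attack") ]

-- A's for-loop over WAZUH_RULE_TYPE_MAP.items(): first range containing rid wins.
-- `rid in range(a, b)` is exactly `a ≤ rid ∧ rid < b` (step-1 range membership).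
def wazuhScan (rid : Int) : List ((Int × Int) × String) → Option String
  | [] => none
  | ((a, b), etype) :: rest =>
      if a ≤ rid ∧ rid < b then some etype else wazuhScan rid rest

-- rule_id : Int, so `int(rule_id)` is the identity and never raises (the except branch is dead).
def wazuh_event_type_py (rule_id : Int) : String :=
  let rid := rule_id
  match wazuhScan rid wazuhRuleTypeMap with
  | some etype => etype
  | none => "wazuh_rule_" ++ PySem.Int.toStr rid

-- ===== PORT B =====
-- _TABLE = sorted(((r.start, r.stop, etype) for r, etype in WAZUH_RULE_TYPE_MAP.items()), key=lambda t: t[0])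
def wazuhTable : List (Int × Int × String) :=
  PySem.List.sorted (wazuhRuleTypeMap.map (fun p => (p.1.1, p.1.2, p.2))) (fun t => t.1) false

-- the while-loop binary search: lo ends as the number of table starts ≤ rid.
-- _TABLE[mid] is always in range (0 ≤ lo ≤ mid < hi ≤ len), so indexing is ported with getD;
-- (lo + hi) // 2 on the nonnegative Nat counters is Nat division, exactly Python's floor division.
def wazuhBS (rid : Int) (lo hi : Nat) : Nat :=
  if lo < hi then
    let mid := (lo + hi) / 2
    if (wazuhTable.getD mid (0, 0, "")).1 ≤ rid then wazuhBS rid (mid + 1) hi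
    else wazuhBS rid lo mid
  else lo
termination_by hi - lo
decreasing_by all_goals omega

-- as in A, `int(rule_id)` is the identity on Int and never raises
def wazuh_event_type_py_alt (rule_id : Int) : String :=
  let rid := rule_id
  let lo := wazuhBS rid 0 wazuhTable.length
  if 0 < lo then
    let t := wazuhTable.getD (lo - 1) (0, 0, "")
    if rid < t.2.1 then t.2.2
    else "wazuh_rule_" ++ PySem.Int.toStr rid
  else "wazuh_rule_" ++ PySem.Int.toStr rid

-- ===== PRECONDITION & SPEC =====
def Spec_wazuh_event_type_py (rule_id : Int) (out : String) : Prop := out = wazuh_event_type_py_alt rule_id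
instance (rule_id : Int) (out : String) : Decidable (Spec_wazuh_event_type_py rule_id out) := by unfold Spec_wazuh_event_type_py; infer_instance

-- ===== CLAIM (what is proved, stated in full; the proofs are below) =====
def Claim_equal_wazuh_event_type_py : Prop := ∀ (rule_id : Int), Dom_wazuh_event_type_py rule_id → Spec_wazuh_event_type_py rule_id (wazuh_event_type_py rule_id)

-- ===== LEMMAS AND PROOFS =====

-- the sorted table is the literal strictly-increasing rearrangement of the map
theorem wazuhTable_lit :
    wazuhTable =
      [ (510, 515, "rootcheck_anomaly"),
        (550, 554, "integrity_check"),
        (2501, 2503, "syscheck_change"),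
        (5402, 5404, "sudo_event"),
        (5501, 5504, "login_event"),
        (5551, 5553, "multiple_auth_failure"),
        (5710, 5717, "ssh_auth_failure"),
        (31100, 31200, "web_attack") ] := by
  decide

-- the binary search on the 8-entry table, evaluated to a chain of comparisons on rid
set_option maxRecDepth 10000 in
theorem wazuhBS_eval (rid : Int) :
    wazuhBS rid 0 8 =
      if 31100 ≤ rid then 8 else if 5710 ≤ rid then 7 else if 5551 ≤ rid then 6
      else if 5501 ≤ rid then 5 else if 5402 ≤ rid then 4 else if 2501 ≤ rid then 3
      else if 550 ≤ rid then 2 else if 510 ≤ rid then 1 else 0 := by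
  simp [wazuhBS, wazuhTable_lit]
  split_ifs <;> omega

-- A's loop over the map, written out as its if-chain (definitional unfolding)
theorem wazuhScan_eval (rid : Int) :
    wazuhScan rid wazuhRuleTypeMap =
      if 510 ≤ rid ∧ rid < 515 then some "rootcheck_anomaly"
      else if 550 ≤ rid ∧ rid < 554 then some "integrity_check"
      else if 5501 ≤ rid ∧ rid < 5504 then some "login_event"
      else if 5710 ≤ rid ∧ rid < 5717 then some "ssh_auth_failure"
      else if 5402 ≤ rid ∧ rid < 5404 then some "sudo_event"
      else if 5551 ≤ rid ∧ rid < 5553 then some "multiple_auth_failure"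
      else if 2501 ≤ rid ∧ rid < 2503 then some "syscheck_change"
      else if 31100 ≤ rid ∧ rid < 31200 then some "web_attack"
      else none := rfl

-- ===== VERDICT (by name: the statement is the Claim_ definition above) =====
set_option maxHeartbeats 2000000 in
theorem wazuh_event_type_py_spec : Claim_equal_wazuh_event_type_py := by
  intro rid _
  unfold Spec_wazuh_event_type_py wazuh_event_type_py wazuh_event_type_py_alt
  dsimp only
  rw [wazuhScan_eval]
  rw [show wazuhTable.length = 8 from by rw [wazuhTable_lit]; rfl, wazuhBS_eval]
  by_cases h8 : (31100:Int) ≤ rid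
  · rw [if_pos h8]
    norm_num [wazuhTable_lit]
    split_ifs <;> first | rfl | omega
  · rw [if_neg h8]
    by_cases h7 : (5710:Int) ≤ rid
    · rw [if_pos h7]
      norm_num [wazuhTable_lit]
      split_ifs <;> first | rfl | omega
    · rw [if_neg h7]
      by_cases h6 : (5551:Int) ≤ rid
      · rw [if_pos h6]
        norm_num [wazuhTable_lit]
        split_ifs <;> first | rfl | omega
      · rw [if_neg h6]
        by_cases h5 : (5501:Int) ≤ rid
        · rw [if_pos h5]
          norm_num [wazuhTable_lit]
          split_ifs <;> first | rfl | omega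
        · rw [if_neg h5]
          by_cases h4 : (5402:Int) ≤ rid
          · rw [if_pos h4]
            norm_num [wazuhTable_lit]
            split_ifs <;> first | rfl | omega
          · rw [if_neg h4]
            by_cases h3 : (2501:Int) ≤ rid
            · rw [if_pos h3]
              norm_num [wazuhTable_lit]
              split_ifs <;> first | rfl | omega
            · rw [if_neg h3]
              by_cases h2 : (550:Int) ≤ rid
              · rw [if_pos h2]
                norm_num [wazuhTable_lit]
                split_ifs <;> first | rfl | omega
              · rw [if_neg h2]
                by_cases h1 : (510:Int) ≤ rid
                · rw [if_pos h1]
                  norm_num [wazuhTable_lit]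
                  split_ifs <;> first | rfl | omega
                · rw [if_neg h1]
                  norm_num
                  split_ifs <;> first | rfl | omega
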